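-- pv_equiv track=rewrite | github.com/darvell/open-bc280-firmware | scripts/font_pack_tx02.py | pack_glyphs
-- ===== SOURCE A (Python) =====
-- def pack_glyphs(glyphs, max_w):
--     x = 0
--     y = 0
--     row_h = 0
--     placements = {}
--     for ch, g in glyphs:
--         gw = g['w']
--         gh = g['h']
--         if gw == 0 or gh == 0:
--             placements[ch] = (0, 0)
--             continue
--         if x + gw > max_w:
--             x = 0
--             y += row_h + 1
--             row_h = 0
--         placements[ch] = (x, y)
--         x += gw + 1
--         row_h = max(row_h, gh)
--     atlas_h = y + row_h
--     return placements, atlas_h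
-- ===== SOURCE B (Python) =====
-- def pack_glyphs(glyphs, max_w):
--     # Pass 1: assign each non-zero glyph a shelf (row) index and x offset,
--     # materializing the table of shelf heights; shelves start with one empty shelf.
--     entries = []        # (ch, None) for zero-size glyphs, else (ch, (row_index, x))
--     row_heights = [0]
--     x = 0
--     for ch, g in glyphs:
--         gw = g['w']
--         gh = g['h']
--         if gw == 0 or gh == 0:
--             entries.append((ch, None))
--             continue
--         if x + gw > max_w:
--             row_heights.append(0)
--             x = 0
--         entries.append((ch, (len(row_heights) - 1, x)))
--         row_heights[-1] = max(row_heights[-1], gh)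
--         x += gw + 1
--     # Pass 2: cumulative y offset of each shelf.
--     ys = []
--     y = 0
--     for h in row_heights:
--         ys.append(y)
--         y += h + 1
--     atlas_h = ys[-1] + row_heights[-1]
--     # Pass 3: emit placements in original glyph order.
--     placements = {}
--     for ch, pos in entries:
--         placements[ch] = (0, 0) if pos is None else (pos[1], ys[pos[0]])
--     return placements, atlas_h
-- ===== Notes on version B (the rewrite author's own statement) =====
-- stated objective: alternative
-- what changed: A's single stateful loop (running x, y, row_h, inserting placements on the fly) is re-decomposed into three passes: pass 1 assigns each glyph a shelf index and x while materializing the shelf-height table, pass 2 prefix-sums the shelf heights into y offsets, pass 3 emits the placements dict in glyph order; atlas height comes from the last shelf's y offset plus its height.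
import Mathlib
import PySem

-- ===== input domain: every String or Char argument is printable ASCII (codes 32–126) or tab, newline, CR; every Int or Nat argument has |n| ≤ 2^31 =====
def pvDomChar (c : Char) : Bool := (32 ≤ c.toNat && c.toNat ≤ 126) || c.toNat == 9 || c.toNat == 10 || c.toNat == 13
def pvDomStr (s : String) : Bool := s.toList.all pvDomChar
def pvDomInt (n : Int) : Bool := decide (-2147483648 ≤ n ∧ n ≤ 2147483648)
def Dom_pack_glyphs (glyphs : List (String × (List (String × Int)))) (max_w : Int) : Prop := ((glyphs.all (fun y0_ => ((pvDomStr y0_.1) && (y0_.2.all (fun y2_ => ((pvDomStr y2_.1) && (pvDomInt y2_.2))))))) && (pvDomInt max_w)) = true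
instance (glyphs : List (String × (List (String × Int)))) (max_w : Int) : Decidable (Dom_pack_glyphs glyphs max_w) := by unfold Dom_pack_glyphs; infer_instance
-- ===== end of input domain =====

-- B re-decomposes A's single stateful loop into three passes (assign shelf indices
-- while materializing the shelf-height table; prefix-sum the shelf y offsets; emit
-- placements) — objective: alternative decomposition, same cost.

-- ===== PORT A =====
-- A's single loop over glyphs with running state (x, y, row_h, placements).
def packA_loop (max_w : Int) : List (String × (List (String × Int))) → Int → Int → Int →
    PySem.Dict String (Int × Int) → Option (PySem.Dict String (Int × Int) × Int)
  | [], _, y, row_h, pl => some (pl, y + row_h)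
  | (ch, g) :: gs, x, y, row_h, pl =>
    match (PySem.Dict.ofList g).get? "w", (PySem.Dict.ofList g).get? "h" with
    | some gw, some gh =>
      if gw = 0 ∨ gh = 0 then
        packA_loop max_w gs x y row_h (pl.insert ch (0, 0))
      else
        let s := if x + gw > max_w then (0, y + row_h + 1, 0) else (x, y, row_h)
        packA_loop max_w gs (s.1 + gw + 1) s.2.1 (max s.2.2 gh) (pl.insert ch (s.1, s.2.1))
    | _, _ => none  -- KeyError in Python: excluded by Pre_

def pack_glyphs (glyphs : List (String × (List (String × Int)))) (max_w : Int) : (List (String × Int × Int)) × Int :=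
  match packA_loop max_w glyphs 0 0 0 PySem.Dict.empty with
  | some (pl, atlas_h) => (pl.items, atlas_h)
  | none => ([], 0)

-- ===== PORT B =====
-- row_heights[-1] = v
def packB_setLast (l : List Int) (v : Int) : List Int := l.dropLast ++ [v]

-- Pass 1: per glyph either none (zero-size) or (shelf index, x); returns (entries, row_heights, x).
def packB_pass1 (max_w : Int) : List (String × (List (String × Int))) → List Int → Int →
    Option (List (String × Option (Nat × Int)) × List Int × Int)
  | [], rows, x => some ([], rows, x)
  | (ch, g) :: gs, rows, x =>
    match (PySem.Dict.ofList g).get? "w", (PySem.Dict.ofList g).get? "h" with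
    | some gw, some gh =>
      if gw = 0 ∨ gh = 0 then
        (packB_pass1 max_w gs rows x).map (fun r => ((ch, none) :: r.1, r.2))
      else
        let rows1 := if x + gw > max_w then rows ++ [0] else rows
        let x1 := if x + gw > max_w then 0 else x
        (packB_pass1 max_w gs (packB_setLast rows1 (max (rows1.getLastD 0) gh)) (x1 + gw + 1)).map
          (fun r => ((ch, some (rows1.length - 1, x1)) :: r.1, r.2))
    | _, _ => none  -- KeyError in Python: excluded by Pre_

-- Pass 2: ys = cumulative y offset of each shelf (second component = running y).
def packB_ys (rows : List Int) : List Int × Int :=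
  rows.foldl (fun p h => (p.1 ++ [p.2], p.2 + h + 1)) (([] : List Int), 0)

-- Pass 3: emit placements in original glyph order.
def packB_place (ys : List Int) (entries : List (String × Option (Nat × Int)))
    (d : PySem.Dict String (Int × Int)) : PySem.Dict String (Int × Int) :=
  entries.foldl (fun d e =>
    d.insert e.1 (match e.2 with
      | none => (0, 0)
      | some (r, x0) => (x0, ys.getD r 0))) d

def pack_glyphs_alt (glyphs : List (String × (List (String × Int)))) (max_w : Int) : (List (String × Int × Int)) × Int :=
  match packB_pass1 max_w glyphs [0] 0 with
  | some (ents, rows, _) =>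
    let ys := (packB_ys rows).1
    ((packB_place ys ents PySem.Dict.empty).items, ys.getLastD 0 + rows.getLastD 0)
  | none => ([], 0)

-- ===== PRECONDITION & SPEC =====
-- Pre_ excludes exactly the inputs where Python A raises KeyError: a glyph dict missing key "w" or "h".
def Pre_pack_glyphs (glyphs : List (String × (List (String × Int)))) (max_w : Int) : Prop :=
  ∀ p ∈ glyphs, ((PySem.Dict.ofList p.2).get? "w").isSome ∧ ((PySem.Dict.ofList p.2).get? "h").isSome

instance (glyphs : List (String × (List (String × Int)))) (max_w : Int) : Decidable (Pre_pack_glyphs glyphs max_w) := by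
  unfold Pre_pack_glyphs; infer_instance

def pvWitness_pack_glyphs : (List (String × (List (String × Int)))) × Int :=
  ([("A", [("w", 3), ("h", 2)]), ("B", [("w", 4), ("h", 1)])], 5)

def Spec_pack_glyphs (glyphs : List (String × (List (String × Int)))) (max_w : Int) (out : (List (String × Int × Int)) × Int) : Prop := out = pack_glyphs_alt glyphs max_w
instance (glyphs : List (String × (List (String × Int)))) (max_w : Int) (out : (List (String × Int × Int)) × Int) : Decidable (Spec_pack_glyphs glyphs max_w out) := by unfold Spec_pack_glyphs; infer_instance

-- ===== CLAIM (what is proved, stated in full; the proofs are below) =====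
def Claim_equal_pack_glyphs : Prop := ∀ (glyphs : List (String × (List (String × Int)))) (max_w : Int), Dom_pack_glyphs glyphs max_w → Pre_pack_glyphs glyphs max_w → Spec_pack_glyphs glyphs max_w (pack_glyphs glyphs max_w)

-- ===== LEMMAS AND PROOFS =====

-- total spacing sum Σ (h+1) of a shelf-height list
def pvYsum (l : List Int) : Int := l.foldl (fun a h => a + h + 1) 0

@[simp] theorem pvYsum_nil : pvYsum [] = 0 := rfl

theorem pv_foldl_shift (l : List Int) : ∀ (c : Int),
    l.foldl (fun a h => a + h + 1) c = c + l.foldl (fun a h => a + h + 1) 0 := by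
  induction l with
  | nil => intro c; simp
  | cons h t ih =>
    intro c
    simp only [List.foldl_cons]
    rw [ih (c + h + 1), ih (0 + h + 1)]
    generalize t.foldl (fun a h => a + h + 1) 0 = F
    ring

theorem pvYsum_cons (h : Int) (t : List Int) : pvYsum (h :: t) = h + 1 + pvYsum t := by
  show (h :: t).foldl (fun a h => a + h + 1) 0 = h + 1 + t.foldl (fun a h => a + h + 1) 0
  simp only [List.foldl_cons]
  rw [pv_foldl_shift t (0 + h + 1)]
  generalize t.foldl (fun a h => a + h + 1) 0 = F
  ring

theorem pvYsum_concat (l : List Int) (a : Int) : pvYsum (l ++ [a]) = pvYsum l + a + 1 := by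
  show (l ++ [a]).foldl (fun a h => a + h + 1) 0 = l.foldl (fun a h => a + h + 1) 0 + a + 1
  rw [List.foldl_append]
  simp only [List.foldl_cons, List.foldl_nil]

theorem pv_self_eq_dropLast_concat (l : List Int) (h : l ≠ []) :
    l.dropLast ++ [l.getLastD 0] = l := by
  rw [List.getLastD_eq_getLast?, List.getLast?_eq_getLast_of_ne_nil h]
  exact List.dropLast_concat_getLast h

theorem pvYsum_eq (l : List Int) (h : l ≠ []) :
    pvYsum l = pvYsum l.dropLast + l.getLastD 0 + 1 := by
  conv_lhs => rw [← pv_self_eq_dropLast_concat l h]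
  rw [pvYsum_concat]

theorem packB_ys_go (rows : List Int) : ∀ (acc : List Int) (y0 : Int),
    rows.foldl (fun p h => (p.1 ++ [p.2], p.2 + h + 1)) (acc, y0)
      = (acc ++ (List.range rows.length).map (fun r => y0 + pvYsum (rows.take r)),
         y0 + pvYsum rows) := by
  induction rows with
  | nil => intro acc y0; simp
  | cons h t ih =>
    intro acc y0
    simp only [List.foldl_cons]
    rw [ih]
    simp only [List.length_cons, List.range_succ_eq_map, List.map_cons, List.map_map,
      Prod.mk.injEq]
    refine ⟨?_, by rw [pvYsum_cons]; ring⟩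
    rw [List.append_assoc, List.singleton_append]
    congr 1
    congr 1
    · simp
    · apply List.map_congr_left
      intro r _
      simp only [Function.comp_apply, List.take_succ_cons, pvYsum_cons]
      ring

theorem packB_ys_fst (rows : List Int) :
    (packB_ys rows).1 = (List.range rows.length).map (fun r => pvYsum (rows.take r)) := by
  unfold packB_ys
  rw [packB_ys_go]
  simp

theorem packB_ys_getD (rows : List Int) (r : Nat) (h : r < rows.length) :
    (packB_ys rows).1.getD r 0 = pvYsum (rows.take r) := by
  rw [packB_ys_fst, List.getD_eq_getElem?_getD, List.getElem?_map, List.getElem?_range h]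
  rfl

theorem packB_ys_getLastD (rows : List Int) (h : rows ≠ []) :
    (packB_ys rows).1.getLastD 0 = pvYsum rows.dropLast := by
  rw [packB_ys_fst]
  obtain ⟨n, hn⟩ : ∃ n, rows.length = n + 1 := by
    cases rows with
    | nil => exact absurd rfl h
    | cons a t => exact ⟨t.length, rfl⟩
  rw [hn, List.range_succ, List.map_append, List.map_cons, List.map_nil, List.getLastD_concat,
    List.dropLast_eq_take, hn]
  simp

theorem packB_setLast_reduce (rows : List Int) (gh : Int) :
    packB_setLast (rows ++ [0]) (max ((rows ++ [0]).getLastD 0) gh) = rows ++ [max 0 gh] := by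
  unfold packB_setLast
  rw [List.getLastD_concat, List.dropLast_concat]

-- stability of already-closed shelves under pass 1
theorem packB_pass1_stable (max_w : Int) (gs : List (String × (List (String × Int)))) :
    ∀ rows x out, packB_pass1 max_w gs rows x = some out → rows ≠ [] →
      rows.length ≤ out.2.1.length ∧ out.2.1.take (rows.length - 1) = rows.take (rows.length - 1) := by
  induction gs with
  | nil =>
    intro rows x out hout _
    simp only [packB_pass1] at hout
    cases hout
    exact ⟨le_refl _, rfl⟩
  | cons p gs ih =>
    intro rows x out hout hne
    obtain ⟨ch, g⟩ := p
    cases hw : (PySem.Dict.ofList g).get? "w" with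
    | none =>
      cases hh : (PySem.Dict.ofList g).get? "h" <;> simp [packB_pass1, hw, hh] at hout
    | some gw =>
      cases hh : (PySem.Dict.ofList g).get? "h" with
      | none => simp [packB_pass1, hw, hh] at hout
      | some gh =>
        simp only [packB_pass1, hw, hh] at hout
        by_cases hz : gw = 0 ∨ gh = 0
        · rw [if_pos hz] at hout
          cases hrec : packB_pass1 max_w gs rows x with
          | none => rw [hrec] at hout; simp at hout
          | some r =>
            rw [hrec] at hout
            simp only [Option.map_some] at hout
            cases hout
            exact ih rows x r hrec hne
        · rw [if_neg hz] at hout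
          by_cases hgt : x + gw > max_w
          · simp only [if_pos hgt, packB_setLast_reduce] at hout
            cases hrec : packB_pass1 max_w gs (rows ++ [max 0 gh]) (0 + gw + 1) with
            | none => rw [hrec] at hout; simp at hout
            | some r =>
              rw [hrec] at hout
              simp only [Option.map_some] at hout
              cases hout
              have hr := ih (rows ++ [max 0 gh]) (0 + gw + 1) r hrec (by simp)
              have h1 := hr.1
              have h2 := hr.2
              simp only [List.length_append, List.length_cons, List.length_nil] at h1 h2
              have hk : rows.length + 1 - 1 = rows.length := by omega
              rw [hk, List.take_left] at h2
              refine ⟨by simp only; omega, ?_⟩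
              have hle : rows.length - 1 ≤ rows.length := by omega
              calc (r.2.1.take (rows.length - 1))
                  = (r.2.1.take rows.length).take (rows.length - 1) := by
                    rw [List.take_take, min_eq_left hle]
                _ = rows.take (rows.length - 1) := by rw [h2]
          · simp only [if_neg hgt] at hout
            have hpos : 1 ≤ rows.length := List.length_pos_iff.mpr hne
            have hlen2 : (packB_setLast rows (max (rows.getLastD 0) gh)).length = rows.length := by
              unfold packB_setLast
              rw [List.length_append, List.length_dropLast]
              simp
              omega
            have hne2 : packB_setLast rows (max (rows.getLastD 0) gh) ≠ [] := by
              intro hc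
              rw [hc] at hlen2
              simp at hlen2
              omega
            cases hrec : packB_pass1 max_w gs (packB_setLast rows (max (rows.getLastD 0) gh)) (x + gw + 1) with
            | none => rw [hrec] at hout; simp at hout
            | some r =>
              rw [hrec] at hout
              simp only [Option.map_some] at hout
              cases hout
              have hr := ih _ _ r hrec hne2
              rw [hlen2] at hr
              refine ⟨hr.1, ?_⟩
              rw [hr.2]
              unfold packB_setLast
              have hd : rows.dropLast.length = rows.length - 1 := List.length_dropLast
              rw [List.take_append_of_le_length (by omega), List.dropLast_eq_take, List.take_take]
              congr 1
              omega

-- one unfolded step of pass 3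
theorem packB_place_cons_none (ys : List Int) (ch : String)
    (es : List (String × Option (Nat × Int))) (d : PySem.Dict String (Int × Int)) :
    packB_place ys ((ch, none) :: es) d = packB_place ys es (d.insert ch (0, 0)) := rfl

theorem packB_place_cons_some (ys : List Int) (ch : String) (r : Nat) (x0 : Int)
    (es : List (String × Option (Nat × Int))) (d : PySem.Dict String (Int × Int)) :
    packB_place ys ((ch, some (r, x0)) :: es) d
      = packB_place ys es (d.insert ch (x0, ys.getD r 0)) := rfl

-- the main simulation: A's loop from a state encoded by B's shelf-height table
theorem pack_main (max_w : Int) (gs : List (String × (List (String × Int)))) :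
    ∀ rows x pl, rows ≠ [] →
      packA_loop max_w gs x (pvYsum rows.dropLast) (rows.getLastD 0) pl
        = (packB_pass1 max_w gs rows x).map
            (fun r => (packB_place (packB_ys r.2.1).1 r.1 pl,
                       pvYsum r.2.1.dropLast + r.2.1.getLastD 0)) := by
  induction gs with
  | nil =>
    intro rows x pl _
    simp [packA_loop, packB_pass1, packB_place]
  | cons p gs ih =>
    intro rows x pl hne
    obtain ⟨ch, g⟩ := p
    cases hw : (PySem.Dict.ofList g).get? "w" with
    | none =>
      cases hh : (PySem.Dict.ofList g).get? "h" <;> simp [packA_loop, packB_pass1, hw, hh]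
    | some gw =>
      cases hh : (PySem.Dict.ofList g).get? "h" with
      | none => simp [packA_loop, packB_pass1, hw, hh]
      | some gh =>
        simp only [packA_loop, packB_pass1, hw, hh]
        by_cases hz : gw = 0 ∨ gh = 0
        · rw [if_pos hz, if_pos hz]
          rw [ih rows x (pl.insert ch (0, 0)) hne]
          cases hrec : packB_pass1 max_w gs rows x with
          | none => simp
          | some r => simp [packB_place_cons_none]
        · rw [if_neg hz, if_neg hz]
          by_cases hgt : x + gw > max_w
          · simp only [if_pos hgt, packB_setLast_reduce]
            have hy : pvYsum (rows ++ [max 0 gh]).dropLast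
                = pvYsum rows.dropLast + rows.getLastD 0 + 1 := by
              rw [List.dropLast_concat, pvYsum_eq rows hne]
            have hrh : (rows ++ [max 0 gh]).getLastD 0 = max 0 gh := List.getLastD_concat
            have h2 := ih (rows ++ [max 0 gh]) (0 + gw + 1)
              (pl.insert ch (0, pvYsum rows.dropLast + rows.getLastD 0 + 1)) (by simp)
            rw [hy, hrh] at h2
            rw [h2]
            cases hrec : packB_pass1 max_w gs (rows ++ [max 0 gh]) (0 + gw + 1) with
            | none => simp
            | some r =>
              have hst := packB_pass1_stable max_w gs _ _ r hrec (by simp)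
              have hlen := hst.1
              have htk := hst.2
              simp only [List.length_append, List.length_cons, List.length_nil] at hlen htk
              have hk : rows.length + 1 - 1 = rows.length := by omega
              rw [hk, List.take_left] at htk
              have hyv : (packB_ys r.2.1).1.getD ((rows ++ [(0 : Int)]).length - 1) 0
                  = pvYsum rows.dropLast + rows.getLastD 0 + 1 := by
                simp only [List.length_append, List.length_cons, List.length_nil, hk]
                rw [packB_ys_getD r.2.1 rows.length (by omega), htk, pvYsum_eq rows hne]
              simp only [Option.map_some, packB_place_cons_some, hyv]
          · simp only [if_neg hgt]
            have hpos : 1 ≤ rows.length := List.length_pos_iff.mpr hne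
            have hlen2 : (packB_setLast rows (max (rows.getLastD 0) gh)).length = rows.length := by
              unfold packB_setLast
              rw [List.length_append, List.length_dropLast]
              simp
              omega
            have hne2 : packB_setLast rows (max (rows.getLastD 0) gh) ≠ [] := by
              intro hc; rw [hc] at hlen2; simp at hlen2; omega
            have hy : pvYsum (packB_setLast rows (max (rows.getLastD 0) gh)).dropLast
                = pvYsum rows.dropLast := by
              unfold packB_setLast
              rw [List.dropLast_concat]
            have hrh : (packB_setLast rows (max (rows.getLastD 0) gh)).getLastD 0
                = max (rows.getLastD 0) gh := by
              unfold packB_setLast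
              exact List.getLastD_concat
            have h2 := ih (packB_setLast rows (max (rows.getLastD 0) gh)) (x + gw + 1)
              (pl.insert ch (x, pvYsum rows.dropLast)) hne2
            rw [hy, hrh] at h2
            rw [h2]
            cases hrec : packB_pass1 max_w gs (packB_setLast rows (max (rows.getLastD 0) gh)) (x + gw + 1) with
            | none => simp
            | some r =>
              have hst := packB_pass1_stable max_w gs _ _ r hrec hne2
              have hlen := hst.1
              have htk := hst.2
              rw [hlen2] at hlen htk
              have hyv : (packB_ys r.2.1).1.getD (rows.length - 1) 0 = pvYsum rows.dropLast := by
                rw [packB_ys_getD r.2.1 (rows.length - 1) (by omega), htk]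
                unfold packB_setLast
                rw [List.take_append_of_le_length (by rw [List.length_dropLast])]
                rw [List.dropLast_eq_take, List.take_take, min_self]
              simp only [Option.map_some, packB_place_cons_some, hyv]

-- ===== VERDICT (by name: the statement is the Claim_ definition above) =====
theorem pack_glyphs_spec : Claim_equal_pack_glyphs := by
  intro glyphs max_w _ _
  unfold Spec_pack_glyphs pack_glyphs pack_glyphs_alt
  have h := pack_main max_w glyphs [0] 0 PySem.Dict.empty (by simp)
  rw [show pvYsum (([0] : List Int).dropLast) = 0 from rfl,
      show (([0] : List Int)).getLastD 0 = 0 from rfl] at h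
  rw [h]
  cases hrec : packB_pass1 max_w glyphs [0] 0 with
  | none => simp
  | some r =>
    have hst := packB_pass1_stable max_w glyphs [0] 0 r hrec (by simp)
    have hne : r.2.1 ≠ [] := by
      intro hc
      have := hst.1
      rw [hc] at this
      simp at this
    obtain ⟨ents, rows, x⟩ := r
    have hne' : rows ≠ [] := hne
    simp only [Option.map_some]
    rw [packB_ys_getLastD rows hne']
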